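-- pv_equiv track=rewrite | github.com/AlishaSultan/DSA | distinct_pair_that_is_equal_to_target.py | distinct_pair
-- ===== SOURCE A (Python) =====
-- def distinct_pair (arr,k):
--     pair_set = set()
--     distict_pair = []
--     for i in range(1,len(arr)):
--         for j in range(i+1,len(arr)):
--             if arr[i]*arr[j] == k:
--                 if (arr[i],arr[j]) not in pair_set and (arr[j],arr[i]) not in pair_set:
--                     pair_set.add((arr[i],arr[j]))
--                     distict_pair.append((arr[i],arr[j]))
--     return distict_pair
-- ===== SOURCE B (Python) =====
-- def distinct_pair(arr, k):
--     # A only ever pairs indices >= 1; keep that domain explicit.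
--     lst = arr[1:]
--     # value -> multiplicity in the suffix lst[i+1:]; complement lookup replaces the inner scan
--     counts = {}
--     for v in lst[1:]:
--         counts[v] = counts.get(v, 0) + 1
--     pair_set = set()
--     out = []
--     for i in range(len(lst) - 1):
--         a = lst[i]
--         if a == 0:
--             if k == 0:
--                 # product is 0 for every partner: every new suffix value pairs with 0
--                 for x in lst[i + 1:]:
--                     if (0, x) not in pair_set and (x, 0) not in pair_set:
--                         pair_set.add((0, x))
--                         out.append((0, x))
--         elif k % a == 0:
--             c = k // a
--             if counts.get(c, 0) > 0 and (a, c) not in pair_set and (c, a) not in pair_set: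
--                 pair_set.add((a, c))
--                 out.append((a, c))
--         counts[lst[i + 1]] -= 1
--     return out
-- ===== Notes on version B (the rewrite author's own statement) =====
-- stated objective: faster
-- what changed: Replaces A's nested all-pairs scan by a single pass (over arr[1:], the exact range A pairs) with a suffix value-count dict and a complement lookup k//a per element, keeping the same unordered-pair dedup set; an inner suffix scan remains only for a zero element when k==0.
import Mathlib
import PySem

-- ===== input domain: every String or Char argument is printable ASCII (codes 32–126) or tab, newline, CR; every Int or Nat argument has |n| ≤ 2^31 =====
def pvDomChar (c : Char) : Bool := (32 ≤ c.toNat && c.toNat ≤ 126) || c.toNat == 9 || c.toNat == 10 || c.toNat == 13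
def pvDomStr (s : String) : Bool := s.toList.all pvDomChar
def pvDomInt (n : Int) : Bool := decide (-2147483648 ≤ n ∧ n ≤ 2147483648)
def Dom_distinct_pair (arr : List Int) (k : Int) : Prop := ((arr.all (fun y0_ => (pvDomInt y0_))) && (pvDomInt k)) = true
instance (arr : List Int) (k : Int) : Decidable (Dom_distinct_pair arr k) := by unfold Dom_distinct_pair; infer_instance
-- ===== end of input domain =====

-- B replaces A's quadratic nested pair scan by one pass with a suffix value-count dict and a
-- complement lookup per element, over arr[1:] — the exact index range A pairs (its loops start at 1).

-- ===== PORT A =====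
def distinct_pair (arr : List Int) (k : Int) : List (List Int) :=
  let st := (PySem.List.pyRange 1 (PySem.List.len arr)).foldl
    (fun (st : PySem.Set (Int × Int) × List (List Int)) i =>
      (PySem.List.pyRange (i + 1) (PySem.List.len arr)).foldl
        (fun st j =>
          if PySem.List.pyGetD arr i 0 * PySem.List.pyGetD arr j 0 == k then
            if !(PySem.Set.contains st.1 (PySem.List.pyGetD arr i 0, PySem.List.pyGetD arr j 0)) &&
               !(PySem.Set.contains st.1 (PySem.List.pyGetD arr j 0, PySem.List.pyGetD arr i 0)) then
              (PySem.Set.add st.1 (PySem.List.pyGetD arr i 0, PySem.List.pyGetD arr j 0),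
               st.2 ++ [[PySem.List.pyGetD arr i 0, PySem.List.pyGetD arr j 0]])
            else st
          else st) st)
    (PySem.Set.empty, [])
  st.2

-- ===== PORT B =====
def distinct_pair_alt (arr : List Int) (k : Int) : List (List Int) :=
  let lst := PySem.List.slice arr (some 1)
  let counts : PySem.Dict Int Int :=
    (PySem.List.slice lst (some 1)).foldl (fun d v => d.insert v (d.getD v 0 + 1)) PySem.Dict.empty
  let st := (PySem.List.pyRange 0 (PySem.List.len lst - 1)).foldl
    (fun (st : PySem.Dict Int Int × PySem.Set (Int × Int) × List (List Int)) i =>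
      let a := PySem.List.pyGetD lst i 0
      let st1 :=
        if a == 0 then
          if k == 0 then
            let inner := (PySem.List.slice lst (some (i + 1))).foldl
              (fun (p : PySem.Set (Int × Int) × List (List Int)) x =>
                if !(PySem.Set.contains p.1 ((0 : Int), x)) && !(PySem.Set.contains p.1 (x, (0 : Int))) then
                  (PySem.Set.add p.1 ((0 : Int), x), p.2 ++ [[(0 : Int), x]])
                else p) (st.2.1, st.2.2)
            (st.1, inner.1, inner.2)
          else st
        else if PySem.Int.mod k a == 0 then
          let c := PySem.Int.floordiv k a
          if decide (0 < st.1.getD c 0) && !(PySem.Set.contains st.2.1 (a, c)) &&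
             !(PySem.Set.contains st.2.1 (c, a)) then
            (st.1, PySem.Set.add st.2.1 (a, c), st.2.2 ++ [[a, c]])
          else st
        else st
      let x := PySem.List.pyGetD lst (i + 1) 0
      (st1.1.insert x (st1.1.getD x 0 - 1), st1.2.1, st1.2.2))
    (counts, PySem.Set.empty, [])
  st.2.2

-- ===== PRECONDITION & SPEC =====
def Spec_distinct_pair (arr : List Int) (k : Int) (out : List (List Int)) : Prop := out = distinct_pair_alt arr k
instance (arr : List Int) (k : Int) (out : List (List Int)) : Decidable (Spec_distinct_pair arr k out) := by unfold Spec_distinct_pair; infer_instance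

-- ===== CLAIM (what is proved, stated in full; the proofs are below) =====
def Claim_equal_distinct_pair : Prop := ∀ (arr : List Int) (k : Int), Dom_distinct_pair arr k → Spec_distinct_pair arr k (distinct_pair arr k)

-- ===== LEMMAS AND PROOFS =====

-- A's inner loop over the suffix t for a fixed left element a, on state (seen-set, output).
def pvStepA (k a : Int) (t : List Int) (st : PySem.Set (Int × Int) × List (List Int)) :
    PySem.Set (Int × Int) × List (List Int) :=
  t.foldl (fun st x =>
    if a * x == k then
      if !(PySem.Set.contains st.1 (a, x)) && !(PySem.Set.contains st.1 (x, a)) then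
        (PySem.Set.add st.1 (a, x), st.2 ++ [[a, x]])
      else st
    else st) st

-- A's outer loop, structurally: each head is paired against the rest of the list.
def pvLoopA (k : Int) : List Int → PySem.Set (Int × Int) × List (List Int) → PySem.Set (Int × Int) × List (List Int)
  | [], st => st
  | a :: t, st => pvLoopA k t (pvStepA k a t st)

-- B's per-element step: d holds the multiplicities of the suffix t.
def pvStepB (k a : Int) (d : PySem.Dict Int Int) (t : List Int)
    (st : PySem.Set (Int × Int) × List (List Int)) : PySem.Set (Int × Int) × List (List Int) :=
  if a == 0 then
    if k == 0 then
      t.foldl (fun p x =>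
        if !(PySem.Set.contains p.1 ((0 : Int), x)) && !(PySem.Set.contains p.1 (x, (0 : Int))) then
          (PySem.Set.add p.1 ((0 : Int), x), p.2 ++ [[(0 : Int), x]])
        else p) st
    else st
  else if PySem.Int.mod k a == 0 then
    let c := PySem.Int.floordiv k a
    if decide (0 < d.getD c 0) && !(PySem.Set.contains st.1 (a, c)) && !(PySem.Set.contains st.1 (c, a)) then
      (PySem.Set.add st.1 (a, c), st.2 ++ [[a, c]])
    else st
  else st

-- B's loop, structurally (it stops before the last element).
def pvLoopB (k : Int) : List Int → PySem.Dict Int Int → PySem.Set (Int × Int) × List (List Int) → PySem.Set (Int × Int) × List (List Int)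
  | [], _, st => st
  | [_], _, st => st
  | a :: b :: t, d, st => pvLoopB k (b :: t) (d.insert b (d.getD b 0 - 1)) (pvStepB k a d (b :: t) st)

theorem pvSeen_false (s : PySem.Set (Int × Int)) (p q : Int × Int) (h : p ∈ s ∨ q ∈ s) :
    (!(PySem.Set.contains s p) && !(PySem.Set.contains s q)) = false := by
  rcases h with h | h
  · have hp : PySem.Set.contains s p = true := (PySem.Set.contains_iff s p).2 h
    rw [hp]; rfl
  · have hq : PySem.Set.contains s q = true := (PySem.Set.contains_iff s q).2 h
    rw [hq]
    simp

theorem pvSeen_true (s : PySem.Set (Int × Int)) (p q : Int × Int) (hp : p ∉ s) (hq : q ∉ s) :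
    (!(PySem.Set.contains s p) && !(PySem.Set.contains s q)) = true := by
  have hp' : PySem.Set.contains s p = false := by
    rw [← Bool.not_eq_true]; intro h; exact hp ((PySem.Set.contains_iff s p).1 h)
  have hq' : PySem.Set.contains s q = false := by
    rw [← Bool.not_eq_true]; intro h; exact hq ((PySem.Set.contains_iff s q).1 h)
  rw [hp', hq']; rfl

theorem pvStepA_nil (k a : Int) (st : PySem.Set (Int × Int) × List (List Int)) :
    pvStepA k a [] st = st := rfl

theorem pvStepA_cons (k a x : Int) (t : List Int) (st : PySem.Set (Int × Int) × List (List Int)) :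
    pvStepA k a (x :: t) st =
      pvStepA k a t
        (if a * x == k then
          if !(PySem.Set.contains st.1 (a, x)) && !(PySem.Set.contains st.1 (x, a)) then
            (PySem.Set.add st.1 (a, x), st.2 ++ [[a, x]])
          else st
        else st) := rfl

theorem pvStepA_of_seen (k a c : Int) (ha : a ≠ 0) (hc : a * c = k) (t : List Int)
    (st : PySem.Set (Int × Int) × List (List Int))
    (hs : (a, c) ∈ st.1 ∨ (c, a) ∈ st.1) : pvStepA k a t st = st := by
  induction t generalizing st with
  | nil => rfl
  | cons x t ih =>
    rw [pvStepA_cons]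
    by_cases hx : a * x = k
    · have hxc : x = c := mul_left_cancel₀ ha (hx.trans hc.symm)
      subst hxc
      rw [if_pos (by simpa using hx), pvSeen_false st.1 _ _ hs]
      simp only [Bool.false_eq_true, if_false]
      exact ih st hs
    · rw [if_neg (by simpa using hx)]
      exact ih st hs

theorem pvStepA_char (k a c : Int) (ha : a ≠ 0) (hc : a * c = k) (t : List Int)
    (st : PySem.Set (Int × Int) × List (List Int)) :
    pvStepA k a t st =
      if c ∈ t then
        (if !(PySem.Set.contains st.1 (a, c)) && !(PySem.Set.contains st.1 (c, a)) then
          (PySem.Set.add st.1 (a, c), st.2 ++ [[a, c]])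
        else st)
      else st := by
  induction t generalizing st with
  | nil => simp [pvStepA_nil]
  | cons x t ih =>
    rw [pvStepA_cons]
    by_cases hxc : x = c
    · subst hxc
      have hx : a * x = k := hc
      rw [if_pos (by simpa using hx)]
      by_cases hseen : ((a, x) ∈ st.1 ∨ (x, a) ∈ st.1)
      · rw [pvSeen_false st.1 _ _ hseen]
        simp only [Bool.false_eq_true, if_false, List.mem_cons, true_or, if_true]
        exact pvStepA_of_seen k a x ha hx t st hseen
      · push_neg at hseen
        rw [pvSeen_true st.1 _ _ hseen.1 hseen.2]
        simp only [if_true, List.mem_cons, true_or]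
        exact pvStepA_of_seen k a x ha hx t _
          (Or.inl ((PySem.Set.mem_add st.1 (a, x) (a, x)).2 (Or.inr rfl)))
    · have hx : a * x ≠ k := fun h => hxc (mul_left_cancel₀ ha (h.trans hc.symm))
      rw [if_neg (by simpa using hx), ih st]
      have hcx : (c = x) = False := eq_false (fun h => hxc h.symm)
      simp [List.mem_cons, hcx]

theorem pvStepA_no_match (k a : Int) (t : List Int) (st : PySem.Set (Int × Int) × List (List Int))
    (h : ∀ x ∈ t, a * x ≠ k) : pvStepA k a t st = st := by
  unfold pvStepA
  rw [PySem.List.foldl_congr_mem _ _ (fun acc _ => acc) st (by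
    intro acc x hx
    simp [beq_iff_eq, h x hx])]
  exact PySem.List.foldl_ignore t st

theorem pvStepB_eq_stepA (k a : Int) (d : PySem.Dict Int Int) (t : List Int)
    (st : PySem.Set (Int × Int) × List (List Int))
    (hd : ∀ v, d.getD v 0 = (t.count v : Int)) : pvStepB k a d t st = pvStepA k a t st := by
  unfold pvStepB
  by_cases ha : a = 0
  · subst ha
    by_cases hk : k = 0
    · subst hk
      simp only [beq_self_eq_true, if_true]
      unfold pvStepA
      apply (PySem.List.foldl_congr_mem t _ _ st ?_).symm
      intro acc x _
      simp
    · have : ∀ x ∈ t, (0 : Int) * x ≠ k := by intro x _; simpa using (Ne.symm hk)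
      simp only [beq_self_eq_true, if_true, beq_iff_eq, hk, if_false]
      exact (pvStepA_no_match k 0 t st this).symm
  · by_cases hdvd : a ∣ k
    · have hmod : PySem.Int.mod k a = 0 := (PySem.Int.mod_eq_zero_iff_dvd k a).2 hdvd
      have hc : a * PySem.Int.floordiv k a = k := by
        unfold PySem.Int.floordiv
        exact Int.mul_fdiv_cancel' hdvd
      set c := PySem.Int.floordiv k a with hcdef
      rw [pvStepA_char k a c ha hc t st]
      have hcount : (decide (0 < d.getD c 0)) = decide (c ∈ t) := by
        rw [hd c]
        by_cases hmem : c ∈ t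
        · simp [hmem, List.count_pos_iff.2 hmem]
        · simp [hmem, List.count_eq_zero.2 hmem]
      simp only [beq_iff_eq, ha, if_false, hmod, if_true, beq_self_eq_true, hcount]
      by_cases hmem : c ∈ t
      · simp [hmem]
      · simp [hmem]
    · have hmod : PySem.Int.mod k a ≠ 0 := fun h => hdvd ((PySem.Int.mod_eq_zero_iff_dvd k a).1 h)
      have : ∀ x ∈ t, a * x ≠ k := by
        intro x _ h
        exact hdvd ⟨x, h.symm⟩
      simp only [beq_iff_eq, ha, if_false, hmod]
      exact (pvStepA_no_match k a t st this).symm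

theorem pvLoopB_eq_loopA (k : Int) (l : List Int) : ∀ (d : PySem.Dict Int Int)
    (st : PySem.Set (Int × Int) × List (List Int)),
    (∀ v, d.getD v 0 = (l.tail.count v : Int)) → pvLoopB k l d st = pvLoopA k l st := by
  induction l with
  | nil => intro d st _; rfl
  | cons a t ih =>
    intro d st hd
    cases t with
    | nil => rfl
    | cons b t' =>
      unfold pvLoopB pvLoopA
      rw [pvStepB_eq_stepA k a d (b :: t') st hd]
      apply ih
      intro v
      rw [PySem.Dict.getD_insert]
      by_cases hv : v = b
      · subst hv
        rw [hd v]
        simp [List.count_cons_self]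
      · simp only [hv, if_false]
        rw [hd v]
        have hbv : (b = v) = False := eq_false (fun h => hv h.symm)
        simp [List.count_cons, hbv]

-- A's indexed double loop equals pvLoopA on the suffix from index i.
theorem pvA_loop_eq (arr : List Int) (k : Int) (fuel : Nat) : ∀ (i : Nat)
    (st : PySem.Set (Int × Int) × List (List Int)), arr.length ≤ i + fuel →
    (PySem.List.pyRange (i : Int) (PySem.List.len arr)).foldl
      (fun st x => pvStepA k (PySem.List.pyGetD arr x 0) (arr.drop (x + 1).toNat) st) st =
    pvLoopA k (arr.drop i) st := by
  induction fuel with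
  | zero =>
    intro i st h
    simp only [Nat.add_zero] at h
    rw [PySem.List.pyRange_one_eq_nil (by simp [PySem.List.len]; exact_mod_cast h)]
    rw [List.drop_eq_nil_of_le h]
    rfl
  | succ fuel ih =>
    intro i st h
    by_cases hi : arr.length ≤ i
    · rw [PySem.List.pyRange_one_eq_nil (by simp [PySem.List.len]; exact_mod_cast hi)]
      rw [List.drop_eq_nil_of_le hi]
      rfl
    · push_neg at hi
      rw [PySem.List.pyRange_one_cons (by simp [PySem.List.len]; exact_mod_cast hi)]
      simp only [List.foldl_cons]
      have hget : PySem.List.pyGetD arr (i : Int) 0 = arr[i] := by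
        rw [PySem.List.pyGetD_natCast]
        exact List.getD_eq_getElem arr 0 hi
      have htn : ((i : Int) + 1).toNat = i + 1 := by omega
      have hcast : ((i : Int) + 1) = ((i + 1 : Nat) : Int) := by push_cast; ring
      rw [hget, htn, hcast, ih (i + 1) _ (by omega)]
      have hdrop : arr.drop i = arr[i] :: arr.drop (i + 1) := (List.getElem_cons_drop hi).symm
      rw [hdrop]
      rfl

theorem pvLoopB_short (k : Int) (arr : List Int) (i : Nat) (d : PySem.Dict Int Int)
    (st : PySem.Set (Int × Int) × List (List Int)) (h : arr.length ≤ i + 1) :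
    pvLoopB k (arr.drop i) d st = st := by
  have hlen : (arr.drop i).length ≤ 1 := by rw [List.length_drop]; omega
  cases hdi : arr.drop i with
  | nil => rfl
  | cons a t =>
    rw [hdi] at hlen
    simp only [List.length_cons] at hlen
    have ht : t = [] := List.eq_nil_of_length_eq_zero (by omega)
    rw [ht]
    rfl

-- B's indexed loop equals pvLoopB on the suffix from index i (second component of the fold state).
theorem pvB_loop_eq (arr : List Int) (k : Int) (fuel : Nat) : ∀ (i : Nat)
    (d : PySem.Dict Int Int) (st : PySem.Set (Int × Int) × List (List Int)),
    arr.length ≤ i + 1 + fuel →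
    ((PySem.List.pyRange (i : Int) (PySem.List.len arr - 1)).foldl
      (fun (st : PySem.Dict Int Int × PySem.Set (Int × Int) × List (List Int)) x =>
        (st.1.insert (PySem.List.pyGetD arr (x + 1) 0)
           (st.1.getD (PySem.List.pyGetD arr (x + 1) 0) 0 - 1),
         (pvStepB k (PySem.List.pyGetD arr x 0) st.1 (arr.drop (x + 1).toNat) (st.2.1, st.2.2)).1,
         (pvStepB k (PySem.List.pyGetD arr x 0) st.1 (arr.drop (x + 1).toNat) (st.2.1, st.2.2)).2)) (d, st)).2 =
    pvLoopB k (arr.drop i) d st := by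
  induction fuel with
  | zero =>
    intro i d st h
    rw [PySem.List.pyRange_one_eq_nil (by simp [PySem.List.len]; omega)]
    exact (pvLoopB_short k arr i d st (by omega)).symm
  | succ fuel ih =>
    intro i d st h
    by_cases hi : arr.length ≤ i + 1
    · rw [PySem.List.pyRange_one_eq_nil (by simp [PySem.List.len]; omega)]
      exact (pvLoopB_short k arr i d st (by omega)).symm
    · push_neg at hi
      have hi1 : i + 1 < arr.length := hi
      have hi0 : i < arr.length := by omega
      rw [PySem.List.pyRange_one_cons (by simp [PySem.List.len]; omega)]
      simp only [List.foldl_cons]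
      have hget : PySem.List.pyGetD arr (i : Int) 0 = arr[i] := by
        rw [PySem.List.pyGetD_natCast]
        exact List.getD_eq_getElem arr 0 hi0
      have hget1 : PySem.List.pyGetD arr ((i : Int) + 1) 0 = arr[i + 1] := by
        have hcast : ((i : Int) + 1) = ((i + 1 : Nat) : Int) := by push_cast; ring
        rw [hcast, PySem.List.pyGetD_natCast]
        exact List.getD_eq_getElem arr 0 hi1
      have htn : ((i : Int) + 1).toNat = i + 1 := by omega
      have hcast : ((i : Int) + 1) = ((i + 1 : Nat) : Int) := by push_cast; ring
      simp only [hget, hget1, htn]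
      rw [hcast, ih (i + 1) _ _ (by omega)]
      have hdrop : arr.drop i = arr[i] :: arr.drop (i + 1) := (List.getElem_cons_drop hi0).symm
      have hdrop1 : arr.drop (i + 1) = arr[i + 1] :: arr.drop (i + 2) := (List.getElem_cons_drop hi1).symm
      rw [hdrop, hdrop1]
      rfl

theorem pvA_eq (arr : List Int) (k : Int) :
    distinct_pair arr k = (pvLoopA k (arr.drop 1) (PySem.Set.empty, [])).2 := by
  unfold distinct_pair
  have hinner : ((PySem.List.pyRange 1 (PySem.List.len arr)).foldl
      (fun (st : PySem.Set (Int × Int) × List (List Int)) i =>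
        (PySem.List.pyRange (i + 1) (PySem.List.len arr)).foldl
          (fun st j =>
            if PySem.List.pyGetD arr i 0 * PySem.List.pyGetD arr j 0 == k then
              if !(PySem.Set.contains st.1 (PySem.List.pyGetD arr i 0, PySem.List.pyGetD arr j 0)) &&
                 !(PySem.Set.contains st.1 (PySem.List.pyGetD arr j 0, PySem.List.pyGetD arr i 0)) then
                (PySem.Set.add st.1 (PySem.List.pyGetD arr i 0, PySem.List.pyGetD arr j 0),
                 st.2 ++ [[PySem.List.pyGetD arr i 0, PySem.List.pyGetD arr j 0]])
              else st
            else st) st)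
      (PySem.Set.empty, [])) =
      ((PySem.List.pyRange 1 (PySem.List.len arr)).foldl
        (fun st x => pvStepA k (PySem.List.pyGetD arr x 0) (arr.drop (x + 1).toNat) st)
        (PySem.Set.empty, [])) := by
    apply PySem.List.foldl_congr_mem
    intro acc x hx
    have hx1 : 1 ≤ x := ((PySem.List.mem_pyRange_one).1 hx).1
    have h0 : (0 : Int) ≤ x + 1 := by omega
    exact PySem.List.foldl_pyRange_pyGetD arr 0
      (fun st y =>
        if PySem.List.pyGetD arr x 0 * y == k then
          if !(PySem.Set.contains st.1 (PySem.List.pyGetD arr x 0, y)) &&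
             !(PySem.Set.contains st.1 (y, PySem.List.pyGetD arr x 0)) then
            (PySem.Set.add st.1 (PySem.List.pyGetD arr x 0, y), st.2 ++ [[PySem.List.pyGetD arr x 0, y]])
          else st
        else st) acc h0
  rw [hinner]
  have hmain := pvA_loop_eq arr k arr.length 1 (PySem.Set.empty, []) (by omega)
  simp only [Nat.cast_one] at hmain
  rw [hmain]

theorem pvB_eq (arr : List Int) (k : Int) :
    distinct_pair_alt arr k =
      (pvLoopB k (arr.drop 1)
        (((arr.drop 1).drop 1).foldl (fun d v => d.insert v (d.getD v 0 + 1)) PySem.Dict.empty)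
        (PySem.Set.empty, [])).2 := by
  simp only [distinct_pair_alt]
  rw [PySem.List.slice_from arr (by norm_num : (0:Int) ≤ 1)]
  simp only [Int.toNat_one]
  rw [PySem.List.slice_from (arr.drop 1) (by norm_num : (0:Int) ≤ 1)]
  simp only [Int.toNat_one]
  refine Eq.trans (congrArg
    (fun s : PySem.Dict Int Int × PySem.Set (Int × Int) × List (List Int) => s.2.2)
    (PySem.List.foldl_congr_mem (PySem.List.pyRange 0 (PySem.List.len (arr.drop 1) - 1)) _
      (fun (st : PySem.Dict Int Int × PySem.Set (Int × Int) × List (List Int)) i =>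
        (st.1.insert (PySem.List.pyGetD (arr.drop 1) (i + 1) 0)
           (st.1.getD (PySem.List.pyGetD (arr.drop 1) (i + 1) 0) 0 - 1),
         (pvStepB k (PySem.List.pyGetD (arr.drop 1) i 0) st.1 ((arr.drop 1).drop (i + 1).toNat) (st.2.1, st.2.2)).1,
         (pvStepB k (PySem.List.pyGetD (arr.drop 1) i 0) st.1 ((arr.drop 1).drop (i + 1).toNat) (st.2.1, st.2.2)).2))
      _ ?_)) ?_
  · intro st i hi
    have hx0 : 0 ≤ i := ((PySem.List.mem_pyRange_one).1 hi).1
    rw [PySem.List.slice_from (arr.drop 1) (by omega : (0:Int) ≤ i + 1)]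
    unfold pvStepB
    by_cases ha : PySem.List.pyGetD (arr.drop 1) i 0 = 0
    · by_cases hk : k = 0
      · simp only [ha, hk, beq_self_eq_true, if_true]
      · have hk' : (k == 0) = false := by simpa using hk
        simp only [ha, beq_self_eq_true, if_true, hk', Bool.false_eq_true, if_false]
    · have ha' : (PySem.List.pyGetD (arr.drop 1) i 0 == 0) = false := by simpa using ha
      by_cases hm : PySem.Int.mod k (PySem.List.pyGetD (arr.drop 1) i 0) = 0
      · have hm' : (PySem.Int.mod k (PySem.List.pyGetD (arr.drop 1) i 0) == 0) = true := by simpa using hm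
        simp only [ha', Bool.false_eq_true, if_false, hm', if_true]
        split <;> split <;> first | rfl | (rename_i h1 h2; exact absurd h1 h2) | (rename_i h1 h2; exact absurd h2 h1)
      · have hm' : (PySem.Int.mod k (PySem.List.pyGetD (arr.drop 1) i 0) == 0) = false := by simpa using hm
        simp only [ha', hm', Bool.false_eq_true, if_false]
  · beta_reduce
    have hmain := pvB_loop_eq (arr.drop 1) k (arr.drop 1).length 0
      (((arr.drop 1).drop 1).foldl (fun d v => d.insert v (d.getD v 0 + 1)) PySem.Dict.empty)
      (PySem.Set.empty, []) (by omega)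
    simp only [Nat.cast_zero] at hmain
    rw [hmain]
    simp [List.drop_zero]

theorem pv_main (arr : List Int) (k : Int) : distinct_pair arr k = distinct_pair_alt arr k := by
  rw [pvA_eq, pvB_eq]
  rw [pvLoopB_eq_loopA k (arr.drop 1) _ _ (by
    intro v
    rw [PySem.Dict.getD_foldl_insert_add_one]
    simp [← List.drop_one, List.drop_drop])]

-- ===== VERDICT (by name: the statement is the Claim_ definition above) =====
theorem distinct_pair_spec : Claim_equal_distinct_pair := by
  intro arr k _
  exact pv_main arr k
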